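-- pv_equiv track=rewrite | github.com/Ashbinbiju/beta-sgenie | streamlit_app.py | assign_primary_sector
-- ===== SOURCE A (Python) =====
-- def assign_primary_sector(symbol, sectors_dict):
--     """Assign primary sector based on priority logic"""
--     priority_sectors = [
--         "Bank", "IT", "Pharma", "Auto", "FMCG",
--         "Metals", "Power", "Oil & Gas", "Telecom",
--         "Finance", "Capital Goods", "Chemicals",
--         "Infrastructure", "Cement", "Realty", "Insurance",
--         "Diversified", "Aviation", "Retail", "Media",
--         "Consumer Durables", "Consumer Services"
--     ]
--
--     matching_sectors = [
--         sector for sector in priority_sectors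
--         if symbol in sectors_dict.get(sector, [])
--     ]
--
--     if matching_sectors:
--         return matching_sectors[0]
--
--     for sector, stocks in sectors_dict.items():
--         if symbol in stocks:
--             return sector
--
--     return "Unknown"
-- ===== SOURCE B (Python) =====
-- def assign_primary_sector(symbol, sectors_dict):
--     """Assign primary sector based on priority logic (single pass + rank index)"""
--     priority_sectors = [
--         "Bank", "IT", "Pharma", "Auto", "FMCG",
--         "Metals", "Power", "Oil & Gas", "Telecom",
--         "Finance", "Capital Goods", "Chemicals",
--         "Infrastructure", "Cement", "Realty", "Insurance",
--         "Diversified", "Aviation", "Retail", "Media",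
--         "Consumer Durables", "Consumer Services"
--     ]
--     rank = {s: i for i, s in enumerate(priority_sectors)}
--     best = None          # (rank, sector) with the smallest rank seen so far
--     first_match = None   # first sector in dict order containing symbol
--     for sector, stocks in sectors_dict.items():
--         if symbol in stocks:
--             if first_match is None:
--                 first_match = sector
--             r = rank.get(sector)
--             if r is not None and (best is None or r < best[0]):
--                 best = (r, sector)
--     if best is not None:
--         return best[1]
--     if first_match is not None:
--         return first_match
--     return "Unknown"
-- ===== Notes on version B (the rewrite author's own statement) =====
-- stated objective: alternative
-- what changed: A's two sequential scans (a filter over the 22 priority sectors with a dict lookup each, then a fallback scan over the dict) are replaced by one pass over the dict items that tracks the minimum-rank priority match via a precomputed sector->rank index and the first dict-order match simultaneously.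
import Mathlib
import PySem

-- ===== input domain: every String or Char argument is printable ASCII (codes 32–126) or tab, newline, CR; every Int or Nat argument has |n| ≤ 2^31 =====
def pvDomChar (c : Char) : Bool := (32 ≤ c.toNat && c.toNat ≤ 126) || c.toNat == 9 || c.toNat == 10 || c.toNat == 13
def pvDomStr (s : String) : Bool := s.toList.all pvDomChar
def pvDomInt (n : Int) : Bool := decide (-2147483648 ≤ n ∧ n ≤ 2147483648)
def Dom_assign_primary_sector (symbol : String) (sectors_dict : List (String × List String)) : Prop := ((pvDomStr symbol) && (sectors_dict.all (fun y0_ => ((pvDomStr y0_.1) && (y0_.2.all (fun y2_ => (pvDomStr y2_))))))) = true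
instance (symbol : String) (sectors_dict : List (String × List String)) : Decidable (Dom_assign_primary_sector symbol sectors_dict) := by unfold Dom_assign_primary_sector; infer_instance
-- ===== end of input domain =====

-- B replaces A's two sequential scans by one pass over the dict items with a precomputed
-- sector->rank index, tracking the best-ranked priority match and the first dict-order match.


-- ===== PORT A =====
def prioritySectors : List String :=
  ["Bank", "IT", "Pharma", "Auto", "FMCG",
   "Metals", "Power", "Oil & Gas", "Telecom",
   "Finance", "Capital Goods", "Chemicals",
   "Infrastructure", "Cement", "Realty", "Insurance",
   "Diversified", "Aviation", "Retail", "Media",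
   "Consumer Durables", "Consumer Services"]

-- sectors_dict.get(sector, []) : first-match lookup in the association list
def pyDictGetD (d : List (String × List String)) (k : String) : List String :=
  match d.find? (fun p => p.1 == k) with
  | some p => p.2
  | none => []

-- the 'for sector, stocks in sectors_dict.items(): if symbol in stocks: return sector' loop
def fallbackLoop (symbol : String) : List (String × List String) → String
  | [] => "Unknown"
  | (sector, stocks) :: rest =>
      if stocks.contains symbol then sector else fallbackLoop symbol rest

def assign_primary_sector (symbol : String) (sectors_dict : List (String × List String)) : String :=
  let matching_sectors :=
    prioritySectors.filter (fun sector => (pyDictGetD sectors_dict sector).contains symbol)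
  match matching_sectors with
  | m :: _ => m
  | [] => fallbackLoop symbol sectors_dict

-- ===== PORT B =====
def prioritySectorsB : List String :=
  ["Bank", "IT", "Pharma", "Auto", "FMCG",
   "Metals", "Power", "Oil & Gas", "Telecom",
   "Finance", "Capital Goods", "Chemicals",
   "Infrastructure", "Cement", "Realty", "Insurance",
   "Diversified", "Aviation", "Retail", "Media",
   "Consumer Durables", "Consumer Services"]

-- rank = {s: i for i, s in enumerate(priority_sectors)}
def rankDict : PySem.Dict String Int :=
  (PySem.List.enumerate prioritySectorsB 0).foldl (fun d p => d.insert p.2 p.1) PySem.Dict.empty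

-- one loop iteration: state = (best : Option (rank × sector), first_match : Option sector)
def altStep (symbol : String) (st : Option (Int × String) × Option String)
    (p : String × List String) : Option (Int × String) × Option String :=
  if p.2.contains symbol then
    let first := match st.2 with | none => some p.1 | some f => some f
    let best :=
      match rankDict.get? p.1 with
      | none => st.1
      | some r =>
        match st.1 with
        | none => some (r, p.1)
        | some b => if r < b.1 then some (r, p.1) else st.1
    (best, first)
  else st

def assign_primary_sector_alt (symbol : String) (sectors_dict : List (String × List String)) : String :=
  let st := sectors_dict.foldl (altStep symbol) (none, none)
  match st.1 with
  | some b => b.2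
  | none =>
    match st.2 with
    | some f => f
    | none => "Unknown"

-- ===== PRECONDITION & SPEC =====
-- Pre_ requires distinct keys: the association list ports a Python dict, which cannot hold
-- duplicate keys, so lists with repeated keys represent no Python input at all.
def Pre_assign_primary_sector (symbol : String) (sectors_dict : List (String × List String)) : Prop :=
  (sectors_dict.map Prod.fst).Nodup
instance (symbol : String) (sectors_dict : List (String × List String)) : Decidable (Pre_assign_primary_sector symbol sectors_dict) := by unfold Pre_assign_primary_sector; infer_instance
def pvWitness_assign_primary_sector : String × (List (String × List String)) :=
  ("AAA", [("Bank", ["AAA"]), ("Misc", ["BBB"])])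

def Spec_assign_primary_sector (symbol : String) (sectors_dict : List (String × List String)) (out : String) : Prop := out = assign_primary_sector_alt symbol sectors_dict
instance (symbol : String) (sectors_dict : List (String × List String)) (out : String) : Decidable (Spec_assign_primary_sector symbol sectors_dict out) := by unfold Spec_assign_primary_sector; infer_instance

-- ===== CLAIM (what is proved, stated in full; the proofs are below) =====
def Claim_equal_assign_primary_sector : Prop := ∀ (symbol : String) (sectors_dict : List (String × List String)), Dom_assign_primary_sector symbol sectors_dict → Pre_assign_primary_sector symbol sectors_dict → Spec_assign_primary_sector symbol sectors_dict (assign_primary_sector symbol sectors_dict)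

-- ===== LEMMAS AND PROOFS =====

-- combine-one-candidate step of B's best tracking
def minCand (b : Option (Int × String)) (c : Int × String) : Option (Int × String) :=
  match b with
  | none => some c
  | some b' => if c.1 < b'.1 then some c else b

-- the candidate a dict item contributes to B's best tracking
def cand (symbol : String) (p : String × List String) : Option (Int × String) :=
  if p.2.contains symbol then (rankDict.get? p.1).map (fun r => (r, p.1)) else none

theorem altStep_fst (symbol : String) (st : Option (Int × String) × Option String)
    (p : String × List String) :
    (altStep symbol st p).1 = match cand symbol p with
      | none => st.1
      | some c => minCand st.1 c := by
  by_cases hc : symbol ∈ p.2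
  · cases hr : rankDict.get? p.1 with
    | none => simp [altStep, cand, hc, hr]
    | some r =>
      cases h1 : st.1 with
      | none => simp [altStep, cand, minCand, hc, hr, h1]
      | some b' =>
        by_cases hlt : r < b'.1
        · simp [altStep, cand, minCand, hc, hr, h1, hlt]
        · simp [altStep, cand, minCand, hc, hr, h1, hlt]
  · simp [altStep, cand, hc]

theorem foldl_altStep_fst (symbol : String) :
    ∀ (l : List (String × List String)) (st : Option (Int × String) × Option String),
      (l.foldl (altStep symbol) st).1 = (l.filterMap (cand symbol)).foldl minCand st.1 := by
  intro l
  induction l with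
  | nil => intro st; rfl
  | cons p rest ih =>
    intro st
    rw [List.foldl_cons, List.filterMap_cons, ih]
    cases hc : cand symbol p with
    | none => rw [altStep_fst]; simp [hc]
    | some c => rw [altStep_fst]; simp [hc]

theorem altStep_snd (symbol : String) (st : Option (Int × String) × Option String)
    (p : String × List String) :
    (altStep symbol st p).2 =
      if symbol ∈ p.2 then (match st.2 with | none => some p.1 | some f => some f)
      else st.2 := by
  by_cases hc : symbol ∈ p.2
  · cases h2 : st.2 with
    | none => simp [altStep, hc, h2]
    | some f => simp [altStep, hc, h2]
  · simp [altStep, hc]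

theorem foldl_altStep_snd_some (symbol : String) :
    ∀ (l : List (String × List String)) (st : Option (Int × String) × Option String)
      (f0 : String), st.2 = some f0 → (l.foldl (altStep symbol) st).2 = some f0 := by
  intro l
  induction l with
  | nil => intro st f0 h; exact h
  | cons p rest ih =>
    intro st f0 h
    rw [List.foldl_cons]
    refine ih _ f0 ?_
    rw [altStep_snd, h]
    by_cases hc : symbol ∈ p.2
    · simp [hc]
    · simp [hc]

theorem foldl_altStep_snd_none (symbol : String) :
    ∀ (l : List (String × List String)) (st : Option (Int × String) × Option String),
      st.2 = none →
      (l.foldl (altStep symbol) st).2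
        = (l.find? (fun p => p.2.contains symbol)).map Prod.fst := by
  intro l
  induction l with
  | nil => intro st h; simpa using h
  | cons p rest ih =>
    intro st h
    rw [List.foldl_cons]
    by_cases hc : symbol ∈ p.2
    · have hstep : (altStep symbol st p).2 = some p.1 := by
        rw [altStep_snd, h]; simp [hc]
      rw [foldl_altStep_snd_some symbol rest _ p.1 hstep,
        List.find?_cons_of_pos (by simpa using hc)]
      rfl
    · have hstep : (altStep symbol st p).2 = none := by
        rw [altStep_snd, h]; simp [hc]
      rw [ih _ hstep, List.find?_cons_of_neg (by simpa using hc)]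

theorem fallbackLoop_eq_find (symbol : String) :
    ∀ (l : List (String × List String)),
      fallbackLoop symbol l
        = match (l.find? (fun p => p.2.contains symbol)).map Prod.fst with
          | some f => f
          | none => "Unknown" := by
  intro l
  induction l with
  | nil => rfl
  | cons p rest ih =>
    cases p with
    | mk s v =>
      by_cases hc : v.contains symbol = true
      · rw [List.find?_cons_of_pos (by simpa using hc)]
        simp [fallbackLoop, show symbol ∈ v from by simpa using hc]
      · rw [List.find?_cons_of_neg (by simpa using hc)]
        simp only [Bool.not_eq_true] at hc
        simp only [fallbackLoop, hc, Bool.false_eq_true, if_false]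
        exact ih

theorem foldl_minCand_keep :
    ∀ (cl : List (Int × String)) (b : Int × String),
      (∀ c ∈ cl, b.1 ≤ c.1) → cl.foldl minCand (some b) = some b := by
  intro cl
  induction cl with
  | nil => intro b _; rfl
  | cons c rest ih =>
    intro b hb
    have h1 : b.1 ≤ c.1 := hb c (List.mem_cons_self)
    have : minCand (some b) c = some b := by
      simp [minCand, not_lt.mpr h1]
    simp only [List.foldl_cons, this]
    exact ih b (fun x hx => hb x (List.mem_cons_of_mem _ hx))

theorem foldl_minCand_reach :
    ∀ (cl : List (Int × String)) (c0 : Int × String),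
      c0 ∈ cl → (∀ c ∈ cl, c0.1 < c.1 ∨ c = c0) →
      ∀ (b0 : Option (Int × String)),
        (b0 = none ∨ ∃ b, b0 = some b ∧ c0.1 < b.1) →
        cl.foldl minCand b0 = some c0 := by
  intro cl
  induction cl with
  | nil => intro c0 h; exact absurd h (List.not_mem_nil)
  | cons c rest ih =>
    intro c0 hmem hall b0 hb0
    by_cases hceq : c = c0
    · subst hceq
      have hstep : minCand b0 c = some c := by
        rcases hb0 with h | ⟨b, rfl, hlt⟩
        · subst h; rfl
        · simp [minCand, hlt]
      simp only [List.foldl_cons, hstep]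
      exact foldl_minCand_keep rest c (fun x hx => by
        rcases hall x (List.mem_cons_of_mem _ hx) with h | h
        · exact le_of_lt h
        · subst h; exact le_refl _)
    · have hclt : c0.1 < c.1 := by
        rcases hall c (List.mem_cons_self) with h | h
        · exact h
        · exact absurd h hceq
      have hmem' : c0 ∈ rest := by
        rcases List.mem_cons.mp hmem with h | h
        · exact absurd h.symm hceq
        · exact h
      have hb0' : minCand b0 c = none ∨ ∃ b, minCand b0 c = some b ∧ c0.1 < b.1 := by
        rcases hb0 with h | ⟨b, rfl, hlt⟩
        · subst h; exact Or.inr ⟨c, rfl, hclt⟩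
        · by_cases hlt2 : c.1 < b.1
          · exact Or.inr ⟨c, by simp [minCand, hlt2], hclt⟩
          · exact Or.inr ⟨b, by simp [minCand, hlt2], hlt⟩
      simp only [List.foldl_cons]
      exact ih c0 hmem' (fun x hx => hall x (List.mem_cons_of_mem _ hx)) _ hb0'

theorem find_of_nodup (k : String) (v : List String) :
    ∀ (l : List (String × List String)), (l.map Prod.fst).Nodup → (k, v) ∈ l →
      l.find? (fun p => p.1 == k) = some (k, v) := by
  intro l
  induction l with
  | nil => intro _ h; exact absurd h (List.not_mem_nil)
  | cons p rest ih =>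
    intro hnd hmem
    have hnd' : (p.1 :: rest.map Prod.fst).Nodup := by simpa using hnd
    rcases List.mem_cons.mp hmem with h | h
    · subst h
      simp [List.find?_cons_of_pos]
    · have hk : p.1 ≠ k := by
        intro hkeq
        have hmemk : k ∈ rest.map Prod.fst := List.mem_map.mpr ⟨(k, v), h, rfl⟩
        have hnot := (List.nodup_cons.mp hnd').1
        rw [hkeq] at hnot
        exact hnot hmemk
      rw [List.find?_cons_of_neg (by simp [hk])]
      exact ih (List.nodup_cons.mp hnd').2 h

theorem matches_to_pair (symbol k : String) (l : List (String × List String)) :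
    (pyDictGetD l k).contains symbol = true →
    ∃ v, (k, v) ∈ l ∧ v.contains symbol = true := by
  intro h
  unfold pyDictGetD at h
  cases hfind : l.find? (fun p => p.1 == k) with
  | none => rw [hfind] at h; simp at h
  | some p =>
    rw [hfind] at h
    have hpmem := List.mem_of_find?_eq_some hfind
    have hpk : p.1 = k := by
      have := List.find?_some hfind
      simpa using this
    exact ⟨p.2, by rw [← hpk]; exact hpmem, h⟩

theorem pair_to_matches (symbol k : String) (v : List String) (l : List (String × List String))
    (hnd : (l.map Prod.fst).Nodup) (hmem : (k, v) ∈ l) (hc : v.contains symbol = true) :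
    (pyDictGetD l k).contains symbol = true := by
  unfold pyDictGetD
  rw [find_of_nodup k v l hnd hmem]
  exact hc

theorem filter_head_min (m : String → Bool) :
    ∀ (ps : List String) (h : String) (t : List String), ps.filter m = h :: t →
      ∃ i, List.idxOf? h ps = some i ∧ m h = true ∧
        ∀ s j, List.idxOf? s ps = some j → m s = true → i ≤ j ∧ (j = i → s = h) := by
  intro ps
  induction ps with
  | nil => intro h t hf; simp at hf
  | cons x xs ih =>
    intro h t hf
    by_cases hmx : m x = true
    · rw [List.filter_cons_of_pos hmx] at hf
      have hx : x = h := by injection hf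
      subst hx
      refine ⟨0, by simp [List.idxOf?_cons], hmx, ?_⟩
      intro s j hj hms
      rw [List.idxOf?_cons] at hj
      by_cases hxs : x == s
      · rw [if_pos hxs] at hj
        have : j = 0 := by simpa using hj.symm
        subst this
        exact ⟨le_refl _, fun _ => (eq_of_beq hxs).symm⟩
      · rw [if_neg hxs] at hj
        cases hj' : List.idxOf? s xs with
        | none => rw [hj'] at hj; simp at hj
        | some j' =>
          rw [hj'] at hj
          have : j = j' + 1 := by simpa using hj.symm
          exact ⟨by omega, by omega⟩
    · rw [List.filter_cons_of_neg (by simpa using hmx)] at hf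
      obtain ⟨i, hidx, hmh, hmin⟩ := ih h t hf
      have hxh : ¬ (x == h) := by
        intro hbe
        exact hmx (eq_of_beq hbe ▸ hmh)
      refine ⟨i + 1, ?_, hmh, ?_⟩
      · rw [List.idxOf?_cons, if_neg hxh, hidx]; rfl
      · intro s j hj hms
        have hxs : ¬ (x == s) := by
          intro hbe
          exact hmx (eq_of_beq hbe ▸ hms)
        rw [List.idxOf?_cons, if_neg hxs] at hj
        cases hj' : List.idxOf? s xs with
        | none => rw [hj'] at hj; simp at hj
        | some j' =>
          rw [hj'] at hj
          have hjj : j = j' + 1 := by simpa using hj.symm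
          obtain ⟨h1, h2⟩ := hmin s j' hj' hms
          exact ⟨by omega, fun he => h2 (by omega)⟩

theorem rank_generic (s : String) :
    ∀ (ps : List String) (d : PySem.Dict String Int) (k : Int),
      ps.Nodup → (∀ x ∈ ps, d.contains x = false) →
      ((PySem.List.enumerate ps k).foldl (fun d p => d.insert p.2 p.1) d).get? s
        = if d.contains s = true then d.get? s
          else (List.idxOf? s ps).map (fun n => k + (n : Int)) := by
  intro ps
  induction ps with
  | nil =>
    intro d k _ _
    simp only [PySem.List.enumerate_nil, List.foldl_nil, List.idxOf?_nil]
    by_cases hc : d.contains s = true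
    · rw [if_pos hc]
    · rw [if_neg hc]
      exact (PySem.Dict.get?_eq_none_iff_contains _ _).mpr (by simpa using hc)
  | cons x xs ih =>
    intro d k hnd hfresh
    rw [PySem.List.enumerate_cons, List.foldl_cons]
    have hxnotin : x ∉ xs := (List.nodup_cons.mp hnd).1
    have hres := ih (d.insert x k) (k + 1) (List.nodup_cons.mp hnd).2
      (fun y hy => by
        rw [PySem.Dict.contains_insert]
        have hyx : ¬ (y == x) := by
          intro hbe; exact hxnotin (eq_of_beq hbe ▸ hy)
        simp only [hyx, Bool.false_or]
        exact hfresh y (List.mem_cons_of_mem _ hy))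
    rw [hres]
    by_cases hsx : s = x
    · subst hsx
      rw [if_pos (PySem.Dict.contains_insert_self d s k),
        if_neg (by simp [hfresh s List.mem_cons_self]),
        PySem.Dict.get?_insert, if_pos rfl, List.idxOf?_cons, if_pos (by simp)]
      simp
    · have hcins : (d.insert x k).contains s = d.contains s := by
        rw [PySem.Dict.contains_insert]
        simp [show ¬ (s == x) = true from by simpa using hsx]
      by_cases hc : d.contains s = true
      · rw [if_pos (by rw [hcins]; exact hc), if_pos hc, PySem.Dict.get?_insert, if_neg hsx]
      · rw [if_neg (by rw [hcins]; exact hc), if_neg hc, List.idxOf?_cons,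
          if_neg (by simp only [beq_iff_eq]; exact fun hh => hsx hh.symm)]
        cases List.idxOf? s xs with
        | none => rfl
        | some n =>
          simp
          omega

theorem rank_eq (s : String) :
    rankDict.get? s = (List.idxOf? s prioritySectors).map (fun n => (n : Int)) := by
  rw [show prioritySectors = prioritySectorsB from rfl]
  unfold rankDict
  rw [rank_generic s prioritySectorsB PySem.Dict.empty 0 (by decide)
    (fun x _ => PySem.Dict.contains_empty x)]
  rw [if_neg (by simp [PySem.Dict.contains_empty])]
  cases List.idxOf? s prioritySectorsB with
  | none => rfl
  | some n => simp

-- the candidates B collects are exactly the dict pairs whose stocks contain symbol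
-- and whose sector is a priority sector (with its rank)
theorem mem_cands (symbol : String) (l : List (String × List String)) (c : Int × String) :
    c ∈ l.filterMap (cand symbol) ↔
      ∃ p ∈ l, p.2.contains symbol = true ∧ rankDict.get? p.1 = some c.1 ∧ c.2 = p.1 := by
  rw [List.mem_filterMap]
  constructor
  · rintro ⟨p, hp, hc⟩
    unfold cand at hc
    by_cases hcon : p.2.contains symbol = true
    · rw [if_pos hcon] at hc
      cases hr : rankDict.get? p.1 with
      | none => rw [hr] at hc; simp at hc
      | some r =>
        rw [hr] at hc
        simp only [Option.map_some, Option.some.injEq] at hc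
        exact ⟨p, hp, hcon, by rw [hr, ← hc], by rw [← hc]⟩
    · rw [if_neg hcon] at hc; simp at hc
  · rintro ⟨p, hp, hcon, hr, hc2⟩
    exact ⟨p, hp, by unfold cand; rw [if_pos hcon, hr]; simp [hc2.symm]⟩

-- ===== VERDICT (by name: the statement is the Claim_ definition above) =====
theorem assign_primary_sector_spec : Claim_equal_assign_primary_sector := by
  intro symbol l _ hpre
  unfold Spec_assign_primary_sector
  unfold Pre_assign_primary_sector at hpre
  unfold assign_primary_sector assign_primary_sector_alt
  simp only []
  rw [foldl_altStep_fst symbol l (none, none)]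
  cases hfil : prioritySectors.filter
      (fun sector => (pyDictGetD l sector).contains symbol) with
  | nil =>
    -- no priority sector matches: B's best stays none and both fall back to dict order
    have hcands : l.filterMap (cand symbol) = [] := by
      rw [List.filterMap_eq_nil_iff]
      intro p hp
      unfold cand
      by_cases hcon : p.2.contains symbol = true
      · rw [if_pos hcon]
        cases hr : rankDict.get? p.1 with
        | none => rfl
        | some r =>
          exfalso
          have hmem : p.1 ∈ prioritySectors := by
            rw [rank_eq] at hr
            by_contra hn
            rw [List.idxOf?_eq_none_iff.mpr (by simpa using hn)] at hr
            simp at hr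
          have hm : (pyDictGetD l p.1).contains symbol = true :=
            pair_to_matches symbol p.1 p.2 l hpre (by simpa using hp) hcon
          have : p.1 ∈ prioritySectors.filter
              (fun sector => (pyDictGetD l sector).contains symbol) :=
            List.mem_filter.mpr ⟨hmem, hm⟩
          rw [hfil] at this
          exact List.not_mem_nil this
      · rw [if_neg hcon]
    rw [hcands, List.foldl_nil]
    rw [foldl_altStep_snd_none symbol l (none, none) rfl, fallbackLoop_eq_find symbol l]
  | cons h t =>
    -- h is the first matching priority sector; show B's best tracking lands on exactly h
    obtain ⟨i, hidx, hmh, hmin⟩ := filter_head_min _ prioritySectors h t hfil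
    obtain ⟨vh, hvh, hvhc⟩ := matches_to_pair symbol h l hmh
    have hrk : rankDict.get? h = some (i : Int) := by
      rw [rank_eq, hidx]
      rfl
    have hc0mem : ((i : Int), h) ∈ l.filterMap (cand symbol) :=
      (mem_cands symbol l ((i : Int), h)).mpr ⟨(h, vh), hvh, hvhc, hrk, rfl⟩
    have hall : ∀ c ∈ l.filterMap (cand symbol), ((i : Int), h).1 < c.1 ∨ c = ((i : Int), h) := by
      intro c hc
      obtain ⟨p, hp, hcon, hr, hc2⟩ := (mem_cands symbol l c).mp hc
      rw [rank_eq] at hr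
      cases hidxp : List.idxOf? p.1 prioritySectors with
      | none => rw [hidxp] at hr; simp at hr
      | some j =>
        rw [hidxp] at hr
        simp at hr
        have hrj : c.1 = (j : Int) := by omega
        have hmp : (pyDictGetD l p.1).contains symbol = true :=
          pair_to_matches symbol p.1 p.2 l hpre (by simpa using hp) hcon
        obtain ⟨hij, heq⟩ := hmin p.1 j (by exact hidxp) hmp
        by_cases hji : j = i
        · right
          have hph : p.1 = h := heq hji
          have hcfst : c.1 = (i : Int) := by omega
          exact Prod.ext hcfst (by rw [hc2, hph])
        · left
          have : i < j := lt_of_le_of_ne hij (fun hh => hji hh.symm)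
          simp only []
          omega
    rw [foldl_minCand_reach (l.filterMap (cand symbol)) ((i : Int), h) hc0mem hall none
      (Or.inl rfl)]
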